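-- pv_equiv track=rewrite | github.com/thisiseunji/til | 코딩테스트문제풀이/기타/mandatory.py | mandatory_check
-- ===== SOURCE A (Python) =====
-- def mandatory_check(order, plans):
--     answer = {}
--     #plans는 다중 리스트
--     for i in range(len(plans)):
--         tmp = ''
--         for j in plans[i]:
--             if j in order:
--                 tmp += j
--         if tmp == order:
--             answer[i+1] = True
--         else:
--             answer[i+1] = False
--
--     return answer
-- ===== SOURCE B (Python) =====
-- def mandatory_check(order, plans):
--     # Streams each plan against `order` with a position pointer instead of
--     # building a filtered string and comparing at the end.
--     answer = {}
--     n = len(order)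
--     for i, plan in enumerate(plans, 1):
--         p = 0
--         ok = True
--         for j in plan:
--             if j in order:
--                 if order[p:p + len(j)] == j:
--                     p += len(j)
--                 else:
--                     ok = False
--         answer[i] = ok and p == n
--     return answer
-- ===== Notes on version B (the rewrite author's own statement) =====
-- stated objective: alternative
-- what changed: B replaces A's build-a-filtered-string-then-compare-to-order pass with a streaming check that keeps a position pointer into order and an ok flag, advancing the pointer when the next kept element matches the slice of order at that position.
import Mathlib
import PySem

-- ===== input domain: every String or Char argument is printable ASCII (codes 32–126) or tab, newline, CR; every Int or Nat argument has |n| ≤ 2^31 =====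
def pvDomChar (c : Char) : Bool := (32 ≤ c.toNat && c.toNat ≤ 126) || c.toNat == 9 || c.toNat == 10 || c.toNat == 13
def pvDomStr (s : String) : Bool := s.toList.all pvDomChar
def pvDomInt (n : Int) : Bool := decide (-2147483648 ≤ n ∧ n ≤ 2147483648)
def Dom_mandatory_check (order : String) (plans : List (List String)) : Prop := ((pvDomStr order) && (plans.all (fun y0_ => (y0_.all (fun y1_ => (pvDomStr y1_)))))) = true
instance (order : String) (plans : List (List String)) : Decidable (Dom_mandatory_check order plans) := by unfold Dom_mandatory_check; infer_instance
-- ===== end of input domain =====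

-- B streams each plan against `order` with a position pointer instead of building a
-- filtered string and comparing it to `order` at the end (alternative decomposition).

-- ===== PORT A =====
-- 'tmp += j' for the elements j contained in order (substring test)
def pvStepA (order : String) (tmp : List Char) (j : String) : List Char :=
  if PySem.Str.isIn j order then tmp ++ j.toList else tmp

-- the body of A's 'for i in range(len(plans))' loop
def pvBodyA (order : String) (plans : List (List String))
    (answer : PySem.Dict Int Bool) (i : Int) : PySem.Dict Int Bool :=
  let tmp := (PySem.List.pyGetD plans i []).foldl (pvStepA order) []
  if tmp = order.toList then answer.insert (i + 1) true
  else answer.insert (i + 1) false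

def mandatory_check (order : String) (plans : List (List String)) : List (Int × Bool) :=
  ((PySem.List.pyRange 0 (plans.length : Int)).foldl (pvBodyA order plans)
    PySem.Dict.empty).items

-- ===== PORT B =====
-- B's inner loop step: state (ok, p); on 'j in order', advance p if order[p:p+len(j)] == j
def pvStepB (order : String) (s : Bool × Int) (j : String) : Bool × Int :=
  if PySem.Str.isIn j order then
    if PySem.List.slice order.toList (some s.2) (some (s.2 + PySem.Str.len j)) = j.toList then
      (s.1, s.2 + PySem.Str.len j)
    else (false, s.2)
  else s

-- B's outer loop body: state (i, answer); answer[i] = ok and p == n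
def pvBodyB (order : String) (st : Int × PySem.Dict Int Bool) (plan : List String) :
    Int × PySem.Dict Int Bool :=
  let r := plan.foldl (pvStepB order) (true, 0)
  (st.1 + 1, st.2.insert st.1 (r.1 && (r.2 == PySem.Str.len order)))

def mandatory_check_alt (order : String) (plans : List (List String)) : List (Int × Bool) :=
  (plans.foldl (pvBodyB order) (1, PySem.Dict.empty)).2.items

-- ===== PRECONDITION & SPEC =====
def Spec_mandatory_check (order : String) (plans : List (List String)) (out : List (Int × Bool)) : Prop := out = mandatory_check_alt order plans
instance (order : String) (plans : List (List String)) (out : List (Int × Bool)) : Decidable (Spec_mandatory_check order plans out) := by unfold Spec_mandatory_check; infer_instance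

-- ===== CLAIM (what is proved, stated in full; the proofs are below) =====
def Claim_equal_mandatory_check : Prop := ∀ (order : String) (plans : List (List String)), Dom_mandatory_check order plans → Spec_mandatory_check order plans (mandatory_check order plans)

-- ===== LEMMAS AND PROOFS =====

-- A's verdict for one plan
def pvValA (order : String) (plan : List String) : Bool :=
  decide ((plan.foldl (pvStepA order) []) = order.toList)

-- B's verdict for one plan
def pvValB (order : String) (plan : List String) : Bool :=
  let r := plan.foldl (pvStepB order) (true, 0)
  r.1 && (r.2 == PySem.Str.len order)

-- invariant tying A's accumulated string to B's (ok, p) state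
def pvInv (order : String) (tmp : List Char) (s : Bool × Int) : Prop :=
  (s.1 = true → ∃ pn : Nat, s.2 = (pn : Int) ∧ pn ≤ order.toList.length ∧ tmp = order.toList.take pn)
  ∧ (s.1 = false → ¬ tmp <+: order.toList)

lemma pvStep_inv (order : String) (tmp : List Char) (s : Bool × Int) (j : String)
    (h : pvInv order tmp s) : pvInv order (pvStepA order tmp j) (pvStepB order s j) := by
  obtain ⟨ht, hf⟩ := h
  by_cases hin : PySem.Str.isIn j order = true
  · have hA : pvStepA order tmp j = tmp ++ j.toList := by
      unfold pvStepA; rw [hin, if_pos rfl]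
    rcases s with ⟨ok, p⟩
    cases ok
    · -- ok = false: tmp is not a prefix; appending keeps it so, ok stays false
      have hnp := hf rfl
      have hB1 : (pvStepB order (false, p) j).1 = false := by
        simp only [pvStepB, hin, if_true]
        split <;> rfl
      constructor
      · intro hcomp; rw [hB1] at hcomp; exact absurd hcomp (by simp)
      · intro _
        rw [hA]
        intro hpre
        exact hnp ((List.prefix_append tmp j.toList).trans hpre)
    · -- ok = true: tmp = take pn
      obtain ⟨pn, hp, hle, htmp⟩ := ht rfl
      simp only at hp
      subst hp
      have hlen : PySem.Str.len j = ((j.toList.length : Nat) : Int) := PySem.Str.len_eq j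
      have hslice : PySem.List.slice order.toList (some ((pn : Nat) : Int))
          (some (((pn : Nat) : Int) + ((j.toList.length : Nat) : Int)))
            = (order.toList.drop pn).take j.toList.length :=
        PySem.List.slice_natCast_add order.toList pn j.toList.length
      by_cases hsl : (order.toList.drop pn).take j.toList.length = j.toList
      · -- slice matches: advance
        have hB : pvStepB order (true, (pn : Int)) j
            = (true, (pn : Int) + (j.toList.length : Int)) := by
          unfold pvStepB
          rw [hin, if_pos rfl, hlen, hslice, if_pos hsl]
        have hle' : pn + j.toList.length ≤ order.toList.length := by
          have := congrArg List.length hsl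
          rw [List.length_take, List.length_drop] at this
          omega
        rw [hA, hB]
        constructor
        · intro _
          exact ⟨pn + j.toList.length, by push_cast; ring, hle',
            by rw [htmp, List.take_add, hsl]⟩
        · intro hcomp; exact absurd hcomp (by simp)
      · -- slice mismatches: ok := false, tmp' is no prefix of order
        have hB : pvStepB order (true, (pn : Int)) j = (false, (pn : Int)) := by
          unfold pvStepB
          rw [hin, if_pos rfl, hlen, hslice, if_neg hsl]
        rw [hA, hB]
        constructor
        · intro hcomp; exact absurd hcomp (by simp)
        · intro _
          rw [htmp]
          intro hpre
          have hpre' : List.take pn order.toList ++ j.toList <+: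
              List.take pn order.toList ++ List.drop pn order.toList := by
            rw [List.take_append_drop]; exact hpre
          rw [List.prefix_append_right_inj] at hpre'
          exact hsl (List.prefix_iff_eq_take.mp hpre').symm
  · -- j not in order: both states unchanged
    simp only [pvStepA, pvStepB, hin, if_false, Bool.false_eq_true]
    exact ⟨ht, hf⟩

lemma pvFold_inv (order : String) (plan : List String) :
    ∀ (tmp : List Char) (s : Bool × Int), pvInv order tmp s →
      pvInv order (plan.foldl (pvStepA order) tmp) (plan.foldl (pvStepB order) s) := by
  induction plan with
  | nil => intro tmp s h; exact h
  | cons j rest ih =>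
    intro tmp s h
    exact ih _ _ (pvStep_inv order tmp s j h)

lemma pvVal_eq (order : String) (plan : List String) :
    pvValA order plan = pvValB order plan := by
  have h0 : pvInv order [] (true, 0) := by
    constructor
    · intro _; exact ⟨0, by simp⟩
    · intro h; simp at h
  have h := pvFold_inv order plan [] (true, 0) h0
  obtain ⟨ht, hf⟩ := h
  unfold pvValA pvValB
  set r := plan.foldl (pvStepB order) (true, 0) with hr
  rcases r with ⟨ok, p⟩
  cases ok
  · have hnp := hf rfl
    have hne : (plan.foldl (pvStepA order) []) ≠ order.toList := by
      intro he; exact hnp (he ▸ List.prefix_refl _)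
    simp [hne]
  · obtain ⟨pn, hp, hle, htmp⟩ := ht rfl
    simp only at hp
    subst hp
    rw [htmp, PySem.Str.len_eq]
    by_cases hpn : pn = order.toList.length
    · subst hpn
      simp
    · have hne : order.toList.take pn ≠ order.toList := by
        intro he
        have := congrArg List.length he
        rw [List.length_take] at this
        omega
      have hbeq : (((pn : Nat) : Int) == ((order.toList.length : Nat) : Int)) = false := by
        simp only [beq_eq_false_iff_ne, ne_eq, Nat.cast_inj]
        exact hpn
      simp only [hne, decide_false, hbeq, Bool.and_false]

-- A's loop over range(len(plans)) characterised
lemma pvA_items (order : String) (plans : List (List String)) : ∀ (k : Nat),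
    ((PySem.List.pyRange 0 (k : Int)).foldl (pvBodyA order plans) PySem.Dict.empty).items
      = (List.range k).map (fun t : Nat => ((t : Int) + 1, pvValA order (plans.getD t []))) := by
  intro k
  induction k with
  | zero => simp [PySem.List.pyRange, PySem.Dict.empty]
  | succ k ih =>
    have hr : PySem.List.pyRange 0 ((k : Int) + 1) = PySem.List.pyRange 0 (k : Int) ++ [(k : Int)] :=
      PySem.List.pyRange_one_succ_right (by positivity)
    have hcast : (((k + 1 : Nat)) : Int) = (k : Int) + 1 := by push_cast; ring
    rw [hcast, hr, List.foldl_append]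
    set d := (PySem.List.pyRange 0 (k : Int)).foldl (pvBodyA order plans) PySem.Dict.empty with hd
    have hkeys : d.keys = (List.range k).map (fun t : Nat => (t : Int) + 1) := by
      simp only [PySem.Dict.keys, ih, List.map_map]
      rfl
    have hfresh : d.contains ((k : Int) + 1) = false := by
      rw [PySem.Dict.contains_eq_decide_mem_keys, hkeys]
      simp only [decide_eq_false_iff_not, List.mem_map, List.mem_range]
      rintro ⟨t, hlt, he⟩
      omega
    have hbody : pvBodyA order plans d (k : Int) =
        d.insert ((k : Int) + 1) (pvValA order (plans.getD k [])) := by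
      simp only [pvBodyA, pvValA, PySem.List.pyGetD_natCast, List.getD]
      split_ifs with he <;> simp [he]
    rw [List.foldl_cons, List.foldl_nil, hbody,
      PySem.Dict.items_insert_of_not_contains d _ hfresh, ih, List.range_succ, List.map_append]
    rfl

-- B's loop over the plans with a running index characterised
lemma pvB_items (order : String) : ∀ (pl : List (List String)) (i : Int) (d : PySem.Dict Int Bool),
    (∀ k ∈ d.keys, k < i) →
    (pl.foldl (pvBodyB order) (i, d)).2.items
      = d.items ++ (List.range pl.length).map
          (fun t : Nat => (i + (t : Int), pvValB order (pl.getD t []))) := by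
  intro pl
  induction pl with
  | nil => intro i d _; simp
  | cons plan rest ih =>
    intro i d hkeys
    have hfresh : d.contains i = false := by
      rw [PySem.Dict.contains_eq_decide_mem_keys]
      simp only [decide_eq_false_iff_not]
      intro hm
      exact absurd (hkeys i hm) (lt_irrefl i)
    have hstep : pvBodyB order (i, d) plan = (i + 1, d.insert i (pvValB order plan)) := rfl
    have hkeys' : ∀ k ∈ (d.insert i (pvValB order plan)).keys, k < i + 1 := by
      intro k hk
      rw [PySem.Dict.keys_insert_of_not_contains d _ hfresh] at hk
      rcases List.mem_append.mp hk with h | h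
      · exact lt_trans (hkeys k h) (by omega)
      · simp at h; omega
    rw [List.foldl_cons, hstep, ih (i + 1) _ hkeys',
      PySem.Dict.items_insert_of_not_contains d _ hfresh]
    simp only [List.length_cons, List.range_succ_eq_map, List.map_cons, List.map_map,
      List.append_assoc, List.cons_append, List.nil_append]
    congr 1
    congr 1
    · simp [List.getD]
    · apply List.map_congr_left
      intro t _
      simp only [Function.comp, Prod.mk.injEq]
      refine ⟨by push_cast; ring, by simp⟩

-- ===== VERDICT (by name: the statement is the Claim_ definition above) =====
theorem mandatory_check_spec : Claim_equal_mandatory_check := by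
  intro order plans _
  unfold Spec_mandatory_check mandatory_check mandatory_check_alt
  rw [pvA_items order plans plans.length,
    pvB_items order plans 1 PySem.Dict.empty
      (by intro k hk; simp [PySem.Dict.empty, PySem.Dict.keys] at hk)]
  simp only [PySem.Dict.empty, List.nil_append]
  apply List.map_congr_left
  intro t _
  rw [pvVal_eq, Int.add_comm]
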